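-- pv_equiv track=rewrite | github.com/Simmu32/TRAFFIC-CHALLAN-EVASION-FAKE-NUMBER-PLATE-DETECTION-SYSTEM | Camplace.py | optimize_cameras
-- ===== SOURCE A (Python) =====
-- def optimize_cameras(intersections, camera_coverage):
--     uncovered = set(intersections)
--     selected = []
--
--     while uncovered:
--         best_cam = None
--         max_cover = set()
--
--         for cam, covers in camera_coverage.items():
--             covered = uncovered.intersection(covers)
--
--             if len(covered) > len(max_cover):
--                 best_cam = cam
--                 max_cover = covered
--
--         if not best_cam:
--             break
--
--         selected.append(best_cam)
--         uncovered -= max_cover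
--
--     return selected
-- ===== SOURCE B (Python) =====
-- def optimize_cameras(intersections, camera_coverage):
--     # Greedy set cover with precomputed restricted coverage lists, an inverted
--     # point->cameras index and incrementally maintained gain counts, instead of
--     # re-intersecting every camera with the uncovered set each round.
--     pts = list(dict.fromkeys(intersections))          # ordered dedup
--     ptsset = set(pts)
--     names = list(camera_coverage)
--     cover = [[p for p in dict.fromkeys(vs) if p in ptsset]
--              for vs in camera_coverage.values()]
--     m = len(cover)
--     where = {}
--     for i in range(m):
--         for p in cover[i]:
--             where.setdefault(p, []).append(i)
--     count = [len(s) for s in cover]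
--     covered = set()
--     remaining = len(pts)
--     selected = []
--     while remaining:
--         best, bc = -1, 0
--         for i in range(m):
--             if count[i] > bc:
--                 best, bc = i, count[i]
--         if best < 0:
--             break
--         selected.append(names[best])
--         for p in cover[best]:
--             if p not in covered:
--                 covered.add(p)
--                 remaining -= 1
--                 for j in where[p]:
--                     count[j] -= 1
--     return selected
-- ===== Notes on version B (the rewrite author's own statement) =====
-- stated objective: faster
-- what changed: Instead of re-intersecting every camera's coverage with the uncovered set on every round, B precomputes each camera's deduplicated coverage restricted to the intersections, builds an inverted point-to-cameras index once, and maintains each camera's marginal gain as an incrementally decremented counter, so a round costs a scan of counters plus work proportional to the newly covered points.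
-- intended difference: On inputs whose camera_coverage contains a camera named "" whose coverage shares a point with intersections, A's truthiness test 'if not best_cam' can stop the greedy loop as soon as that camera becomes the best pick (e.g. A returns [] on ([1], {"": [1]})), silently dropping it and all later picks; B checks the sentinel index instead and returns the full greedy selection (e.g. [""]), which is the intended value. — e.g. on optimize_cameras([1], [("", [1])]): A returns [], B returns [""]
import Mathlib
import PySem

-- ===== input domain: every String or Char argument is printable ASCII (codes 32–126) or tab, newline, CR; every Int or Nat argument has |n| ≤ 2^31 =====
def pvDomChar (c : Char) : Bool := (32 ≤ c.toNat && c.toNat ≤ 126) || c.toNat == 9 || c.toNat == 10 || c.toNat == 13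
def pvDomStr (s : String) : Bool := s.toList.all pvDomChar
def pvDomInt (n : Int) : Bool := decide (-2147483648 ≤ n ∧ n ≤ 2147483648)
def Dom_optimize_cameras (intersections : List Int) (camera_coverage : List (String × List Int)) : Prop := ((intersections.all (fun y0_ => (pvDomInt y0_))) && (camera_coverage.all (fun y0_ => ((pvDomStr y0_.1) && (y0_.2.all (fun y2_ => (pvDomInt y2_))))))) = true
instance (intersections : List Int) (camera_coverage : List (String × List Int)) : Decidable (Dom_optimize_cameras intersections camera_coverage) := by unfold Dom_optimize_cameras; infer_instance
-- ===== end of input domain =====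

-- B replaces A's per-round re-intersection of every camera with the uncovered set by a
-- precomputed inverted index and incrementally maintained gain counters (measurably faster);
-- equivalence is claimed outside D_ (A's falsy-name early break), see below.

-- ===== PORT A =====
-- one round's inner 'for cam, covers in camera_coverage.items()' scan
def aRound (uncovered : List Int) (camera_coverage : List (String × List Int)) :
    Option String × List Int :=
  camera_coverage.foldl
    (fun st cv =>
      let covered := uncovered.filter (fun x => cv.2.contains x)
      if covered.length > st.2.length then (some cv.1, covered) else st)
    (none, [])

-- the 'while uncovered:' loop; fuel = |set(intersections)| + 1 strictly bounds the number of
-- iterations (each iteration removes at least one element from 'uncovered'), so the 0 branch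
-- is never reached on the actual call
def aLoop (camera_coverage : List (String × List Int)) :
    Nat → List Int → List String → List String
  | 0, _, selected => selected
  | fuel + 1, uncovered, selected =>
    if uncovered.isEmpty then selected
    else
      match aRound uncovered camera_coverage with
      | (none, _) => selected
      | (some b, maxCover) =>
        if b = "" then selected          -- 'if not best_cam: break' (None or empty string)
        else
          aLoop camera_coverage fuel
            (uncovered.filter (fun x => !maxCover.contains x))   -- uncovered -= max_cover
            (selected ++ [b])

def optimize_cameras (intersections : List Int) (camera_coverage : List (String × List Int)) : List String :=
  let uncovered := PySem.Set.ofList intersections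
  aLoop camera_coverage (uncovered.length + 1) uncovered []

-- ===== PORT B =====
-- where.setdefault(p, []).append(i) over all i, p in cover[i]
def bWhere (cover : List (List Int)) : PySem.Dict Int (List Nat) :=
  (List.range cover.length).foldl
    (fun d i => (cover.getD i []).foldl (fun d p => d.modify p [] (· ++ [i])) d)
    PySem.Dict.empty

-- 'for i in range(m): if count[i] > bc: best, bc = i, count[i]'
def bScan (m : Nat) (count : List Int) : Int × Int :=
  (List.range m).foldl
    (fun st i => if count.getD i 0 > st.2 then ((i : Int), count.getD i 0) else st)
    (-1, 0)

-- 'while remaining:' loop; state = (count, covered, remaining, selected); same fuel bound as A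
def bLoop (names : List String) (cover : List (List Int)) (whereIdx : PySem.Dict Int (List Nat))
    (m : Nat) :
    Nat → List Int → PySem.Set Int → Int → List String → List String
  | 0, _, _, _, selected => selected
  | fuel + 1, count, covered, remaining, selected =>
    if remaining == 0 then selected
    else
      let st := bScan m count
      if st.1 < 0 then selected
      else
        let best := st.1.toNat
        let upd :=
          (cover.getD best []).foldl
            (fun (acc : PySem.Set Int × Int × List Int) p =>
              if PySem.Set.contains acc.1 p then acc
              else
                (PySem.Set.add acc.1 p, acc.2.1 - 1,
                  (whereIdx.getD p []).foldl (fun c j => c.set j (c.getD j 0 - 1)) acc.2.2))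
            (covered, remaining, count)
        bLoop names cover whereIdx m fuel upd.2.2 upd.1 upd.2.1
          (selected ++ [names.getD best ""])

def optimize_cameras_alt (intersections : List Int) (camera_coverage : List (String × List Int)) : List String :=
  let pts := PySem.List.dedup intersections
  let ptsset := PySem.Set.ofList pts
  let names := camera_coverage.map (·.1)
  let cover := camera_coverage.map
    (fun cv => (PySem.List.dedup cv.2).filter (fun p => PySem.Set.contains ptsset p))
  let count := cover.map (fun s => (s.length : Int))
  bLoop names cover (bWhere cover) cover.length (pts.length + 1) count
    PySem.Set.empty (pts.length : Int) []

-- ===== PRECONDITION & SPEC =====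
-- On inputs whose camera_coverage contains a camera named "" whose coverage shares a point with
-- intersections, A's truthiness test 'if not best_cam' can stop the greedy loop as soon as that
-- camera becomes the best pick, silently dropping it and all later picks; B checks the sentinel
-- index instead and returns the full greedy selection, which is the intended value.
def D_optimize_cameras (intersections : List Int) (camera_coverage : List (String × List Int)) : Prop :=
  ∃ cv ∈ camera_coverage, cv.1 = "" ∧ ∃ p ∈ cv.2, p ∈ intersections
instance (intersections : List Int) (camera_coverage : List (String × List Int)) : Decidable (D_optimize_cameras intersections camera_coverage) := by unfold D_optimize_cameras; infer_instance

def Spec_optimize_cameras (intersections : List Int) (camera_coverage : List (String × List Int)) (out : List String) : Prop := ¬ D_optimize_cameras intersections camera_coverage → out = optimize_cameras_alt intersections camera_coverage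
instance (intersections : List Int) (camera_coverage : List (String × List Int)) (out : List String) : Decidable (Spec_optimize_cameras intersections camera_coverage out) := by unfold Spec_optimize_cameras; infer_instance

def pvDiffWitness_optimize_cameras : List Int × (List (String × List Int)) := ([1], [("", [1])])
def pvDiffWitnessOut_optimize_cameras : (List String) × (List String) := ([], [""])

-- ===== CLAIM (what is proved, stated in full; the proofs are below) =====
def Claim_unchanged_optimize_cameras : Prop := ∀ (intersections : List Int) (camera_coverage : List (String × List Int)), Dom_optimize_cameras intersections camera_coverage → Spec_optimize_cameras intersections camera_coverage (optimize_cameras intersections camera_coverage)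
def Claim_changed_optimize_cameras : Prop := Dom_optimize_cameras (pvDiffWitness_optimize_cameras.1) (pvDiffWitness_optimize_cameras.2) ∧ D_optimize_cameras (pvDiffWitness_optimize_cameras.1) (pvDiffWitness_optimize_cameras.2) ∧ optimize_cameras (pvDiffWitness_optimize_cameras.1) (pvDiffWitness_optimize_cameras.2) = pvDiffWitnessOut_optimize_cameras.1 ∧ optimize_cameras_alt (pvDiffWitness_optimize_cameras.1) (pvDiffWitness_optimize_cameras.2) = pvDiffWitnessOut_optimize_cameras.2 ∧ pvDiffWitnessOut_optimize_cameras.1 ≠ pvDiffWitnessOut_optimize_cameras.2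

-- ===== LEMMAS AND PROOFS =====

-- ---- proof-side helpers (used only by the proofs) ----

-- camera i's marginal gain against uncovered list u (A's 'len(uncovered & covers)')
def gainP (cc : List (String × List Int)) (u : List Int) (i : Nat) : Int :=
  ((u.filter (fun x => (cc.getD i ("", [])).2.contains x)).length : Int)

-- B's precomputed restricted coverage lists, named for the proofs
def coverB (cc : List (String × List Int)) (pts : List Int) : List (List Int) :=
  cc.map (fun cv =>
    (PySem.List.dedup cv.2).filter (fun p => PySem.Set.contains (PySem.Set.ofList pts) p))

-- the loop invariant tying B's state to A's uncovered list u
def INV (cc : List (String × List Int)) (pts u count : List Int)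
    (covered : PySem.Set Int) (remaining : Int) : Prop :=
  u = pts.filter (fun p => !(PySem.Set.contains covered p)) ∧
  remaining = (u.length : Int) ∧
  count.length = cc.length ∧
  ∀ i, i < cc.length → count.getD i 0 = gainP cc u i

lemma setContains_ofList (xs : List Int) (x : Int) :
    PySem.Set.contains (PySem.Set.ofList xs) x = xs.contains x := by
  simp [PySem.Set.contains, List.contains_eq_mem, PySem.Set.mem_ofList]

lemma getD_map_lt {α β : Type} (l : List α) (f : α → β) (j : Nat) (h : j < l.length)
    (d : β) (d' : α) : (l.map f).getD j d = f (l.getD j d') := by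
  simp [List.getD_eq_getElem?_getD, h]

lemma getD_mem {α : Type} (l : List α) (j : Nat) (h : j < l.length) (d : α) :
    l.getD j d ∈ l := by
  simp only [List.getD_eq_getElem?_getD, List.getElem?_eq_getElem h, Option.getD_some]
  exact List.getElem_mem h

-- ---- the round scan: A's best-camera fold agrees with B's counter scan ----

-- one step of A's inner scan / of B's counter scan (named to state the unrolling lemmas)
def stepA (u : List Int) (st : Option String × List Int) (cv : String × List Int) :
    Option String × List Int :=
  let covered := u.filter (fun x => cv.2.contains x)
  if covered.length > st.2.length then (some cv.1, covered) else st

def stepB (count : List Int) (st : Int × Int) (i : Nat) : Int × Int :=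
  if count.getD i 0 > st.2 then ((i : Int), count.getD i 0) else st

lemma aRound_append (u : List Int) (cc : List (String × List Int)) (e : String × List Int) :
    aRound u (cc ++ [e]) = stepA u (aRound u cc) e := by
  simp [aRound, stepA, List.foldl_append]

lemma bScan_succ (m : Nat) (count : List Int) :
    bScan (m + 1) count = stepB count (bScan m count) m := by
  simp [bScan, stepB, List.range_succ, List.foldl_append]

lemma scan_rel (u : List Int) (cc : List (String × List Int)) (count : List Int)
    (hg : ∀ i, i < cc.length → count.getD i 0 = gainP cc u i) :
    (aRound u cc = (none, []) ∧ bScan cc.length count = (-1, 0)) ∨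
    (∃ j, j < cc.length ∧
      aRound u cc = (some (cc.getD j ("", [])).1,
        u.filter (fun x => (cc.getD j ("", [])).2.contains x)) ∧
      bScan cc.length count = ((j : Int), count.getD j 0) ∧ 0 < count.getD j 0) := by
  induction cc using List.reverseRecOn with
  | nil => left; exact ⟨rfl, rfl⟩
  | append_singleton cc e ih =>
    have hlen : (cc ++ [e]).length = cc.length + 1 := by simp
    have hlast : (cc ++ [e]).getD cc.length ("", []) = e := by
      simp [List.getD_eq_getElem?_getD]
    have hget : ∀ i, i < cc.length → (cc ++ [e]).getD i ("", []) = cc.getD i ("", []) := by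
      intro i hi; exact List.getD_append _ _ _ _ hi
    have hg' : ∀ i, i < cc.length → count.getD i 0 = gainP cc u i := by
      intro i hi
      have := hg i (by omega)
      rwa [gainP, hget i hi] at this
    have hglast : count.getD cc.length 0
        = ((u.filter (fun x => e.2.contains x)).length : Int) := by
      have := hg cc.length (by omega)
      rwa [gainP, hlast] at this
    rcases ih hg' with ⟨ha, hb⟩ | ⟨j, hj, ha, hb, hpos⟩
    · by_cases hc : 0 < (u.filter (fun x => e.2.contains x)).length
      · right
        refine ⟨cc.length, by omega, ?_, ?_, ?_⟩
        · rw [aRound_append, ha, hlast]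
          simp only [stepA]
          rw [if_pos (by simpa using hc)]
        · rw [hlen, bScan_succ, hb]
          simp only [stepB]
          rw [if_pos (by rw [hglast]; exact_mod_cast hc)]
        · rw [hglast]; exact_mod_cast hc
      · left
        refine ⟨?_, ?_⟩
        · rw [aRound_append, ha]
          simp only [stepA]
          rw [if_neg (by simpa using hc)]
        · rw [hlen, bScan_succ, hb]
          simp only [stepB]
          rw [if_neg (by rw [hglast]; omega)]
    · have hjlen : ((u.filter (fun x => (cc.getD j ("", [])).2.contains x)).length : Int)
          = count.getD j 0 := (hg' j hj).symm
      have hiff : ((u.filter (fun x => e.2.contains x)).length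
            > (u.filter (fun x => (cc.getD j ("", [])).2.contains x)).length)
          ↔ count.getD cc.length 0 > count.getD j 0 := by
        rw [hglast, ← hjlen]; omega
      by_cases hc : count.getD cc.length 0 > count.getD j 0
      · right
        refine ⟨cc.length, by omega, ?_, ?_, by omega⟩
        · rw [aRound_append, ha, hlast]
          simp only [stepA]
          rw [if_pos (hiff.mpr hc)]
        · rw [hlen, bScan_succ, hb]
          simp only [stepB]
          rw [if_pos hc]
      · right
        refine ⟨j, by omega, ?_, ?_, hpos⟩
        · rw [aRound_append, ha, hget j hj]
          simp only [stepA]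
          rw [if_neg (fun h => hc (hiff.mp h))]
        · rw [hlen, bScan_succ, hb]
          simp only [stepB]
          rw [if_neg hc]

-- ---- the inverted index: bWhere maps each point to the cameras covering it ----

lemma modify_fold_getD (s : List Int) (n : Nat) (d : PySem.Dict Int (List Nat))
    (hnd : s.Nodup) (p : Int) :
    (s.foldl (fun d x => d.modify x [] (· ++ [n])) d).getD p []
      = d.getD p [] ++ (if s.contains p then [n] else []) := by
  have h1 : s.foldl (fun d x => d.modify x [] (· ++ [n])) d
      = (s.map (fun x => (x, n))).foldl (fun d q => d.modify q.1 [] (· ++ [q.2])) d := by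
    rw [List.foldl_map]
  rw [h1, PySem.Dict.getD_foldl_modify_append]
  congr 1
  have h2 : (s.map (fun x => (x, n))).filter (fun q => q.1 == p)
      = (s.filter (fun x => x == p)).map (fun x => (x, n)) := by
    rw [List.filter_map]; rfl
  rw [h2, List.filter_beq, List.map_map, List.map_replicate]
  by_cases hp : p ∈ s
  · rw [List.count_eq_one_of_mem hnd hp]
    simp [List.contains_eq_mem, hp]
  · rw [List.count_eq_zero.mpr hp]
    simp [List.contains_eq_mem, hp]

lemma bWhere_getD (cover : List (List Int)) (hnd : ∀ s ∈ cover, s.Nodup) (p : Int) :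
    (bWhere cover).getD p []
      = (List.range cover.length).filter (fun i => (cover.getD i []).contains p) := by
  induction cover using List.reverseRecOn with
  | nil => simp [bWhere, PySem.Dict.getD_empty]
  | append_singleton c s ih =>
    have hnd' : ∀ t ∈ c, t.Nodup := fun t ht => hnd t (List.mem_append_left _ ht)
    have hgetpre : ∀ i, i < c.length → (c ++ [s]).getD i [] = c.getD i [] := by
      intro i hi; exact List.getD_append _ _ _ _ hi
    have hlast : (c ++ [s]).getD c.length [] = s := by
      simp [List.getD_eq_getElem?_getD]
    have hpre : (List.range c.length).foldl
        (fun d i => ((c ++ [s]).getD i []).foldl (fun d p => d.modify p [] (· ++ [i])) d)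
        PySem.Dict.empty = bWhere c := by
      rw [bWhere]
      exact PySem.List.foldl_congr_mem _ _ _ _
        (fun acc i hi => by rw [hgetpre i (List.mem_range.mp hi)])
    have hlen : (c ++ [s]).length = c.length + 1 := by simp
    rw [bWhere, hlen, List.range_succ, List.foldl_append]
    simp only [List.foldl_cons, List.foldl_nil]
    rw [hpre, hlast,
      modify_fold_getD s c.length _ (hnd s (List.mem_append_right _ (List.mem_singleton_self s))) p,
      ih hnd']
    rw [List.filter_append]
    congr 1
    · exact List.filter_congr (fun i hi => by rw [hgetpre i (List.mem_range.mp hi)])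
    · simp only [List.filter_cons, List.filter_nil]
      rw [hlast]

lemma bWhere_mem (cover : List (List Int)) (hnd : ∀ s ∈ cover, s.Nodup) (p : Int) (i : Nat) :
    i ∈ (bWhere cover).getD p [] ↔ i < cover.length ∧ (cover.getD i []).contains p := by
  rw [bWhere_getD cover hnd p]
  simp [List.mem_filter, List.mem_range]

lemma bWhere_nodup (cover : List (List Int)) (hnd : ∀ s ∈ cover, s.Nodup) (p : Int) :
    ((bWhere cover).getD p []).Nodup := by
  rw [bWhere_getD cover hnd p]
  exact List.Nodup.filter _ (List.nodup_range)

-- ---- the counter-decrement loop ----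

lemma dec_fold_length (js : List Nat) (count : List Int) :
    (js.foldl (fun c j => c.set j (c.getD j 0 - 1)) count).length = count.length := by
  induction js generalizing count with
  | nil => rfl
  | cons j t ih => simpa using ih (count.set j (count.getD j 0 - 1))

lemma dec_fold_getD (js : List Nat) (count : List Int) (hnd : js.Nodup)
    (hlt : ∀ j ∈ js, j < count.length) (i : Nat) :
    (js.foldl (fun c j => c.set j (c.getD j 0 - 1)) count).getD i 0
      = count.getD i 0 - (if i ∈ js then 1 else 0) := by
  induction js generalizing count with
  | nil => simp
  | cons j t ih =>
    simp only [List.foldl_cons]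
    have hj : j < count.length := hlt j (List.mem_cons_self)
    have hjt : j ∉ t := (List.nodup_cons.mp hnd).1
    have hstep : ∀ k : Nat, (count.set j (count.getD j 0 - 1)).getD k 0
        = if k = j then count.getD j 0 - 1 else count.getD k 0 := by
      intro k
      simp only [List.getD_eq_getElem?_getD, List.getElem?_set]
      by_cases hk : j = k
      · subst hk; simp [hj]
      · have hk2 : ¬ k = j := fun h => hk h.symm
        simp [hk, hk2]
    rw [ih (count.set j (count.getD j 0 - 1)) (List.nodup_cons.mp hnd).2
      (fun x hx => by simpa using hlt x (List.mem_cons_of_mem _ hx))]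
    rw [hstep i]
    by_cases hij : i = j
    · subst hij; simp [hjt]
    · simp [List.mem_cons, hij]

-- ---- removing one newly covered point from the uncovered list ----

lemma length_filter_ne (v : List Int) (p : Int) (hv : v.Nodup) (hm : p ∈ v) :
    ((v.filter (fun x => !(x == p))).length : Int) = (v.length : Int) - 1 := by
  have h1 : (v.filter (fun x => x == p)).length + (v.filter (fun x => !(x == p))).length
      = v.length := (List.length_eq_length_filter_add _).symm
  have h2 : (v.filter (fun x => x == p)).length = 1 := by
    rw [List.filter_beq, List.length_replicate, List.count_eq_one_of_mem hv hm]
  omega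

lemma gainP_filter_ne (cc : List (String × List Int)) (u : List Int) (p : Int)
    (hu : u.Nodup) (hm : p ∈ u) (i : Nat) :
    gainP cc (u.filter (fun x => !(x == p))) i
      = gainP cc u i - (if (cc.getD i ("", [])).2.contains p then 1 else 0) := by
  unfold gainP
  have hcomm : (u.filter (fun x => !(x == p))).filter
        (fun x => (cc.getD i ("", [])).2.contains x)
      = (u.filter (fun x => (cc.getD i ("", [])).2.contains x)).filter
        (fun x => !(x == p)) := by
    rw [List.filter_filter, List.filter_filter]
    exact List.filter_congr (fun x _ => Bool.and_comm _ _)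
  rw [hcomm]
  by_cases hpg : (cc.getD i ("", [])).2.contains p
  · have hmem : p ∈ u.filter (fun x => (cc.getD i ("", [])).2.contains x) :=
      List.mem_filter.mpr ⟨hm, hpg⟩
    rw [length_filter_ne _ _ (hu.filter _) hmem, if_pos hpg]
  · have hkeep : (u.filter (fun x => (cc.getD i ("", [])).2.contains x)).filter
          (fun x => !(x == p))
        = u.filter (fun x => (cc.getD i ("", [])).2.contains x) := by
      apply List.filter_eq_self.mpr
      intro x hx
      have hxg := (List.mem_filter.mp hx).2
      simp only [Bool.not_eq_true', beq_eq_false_iff_ne, ne_eq]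
      intro h; subst h; exact hpg hxg
    rw [hkeep, if_neg hpg]
    simp

-- ---- B's inner update fold preserves the invariant ----

def stepU (whereIdx : PySem.Dict Int (List Nat))
    (acc : PySem.Set Int × Int × List Int) (p : Int) : PySem.Set Int × Int × List Int :=
  if PySem.Set.contains acc.1 p then acc
  else (PySem.Set.add acc.1 p, acc.2.1 - 1,
    (whereIdx.getD p []).foldl (fun c j => c.set j (c.getD j 0 - 1)) acc.2.2)

lemma coverB_nodup (cc : List (String × List Int)) (pts : List Int) (_hpts : pts.Nodup) :
    ∀ t ∈ coverB cc pts, t.Nodup := by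
  intro t ht
  obtain ⟨cv, _, rfl⟩ := List.mem_map.mp ht
  exact (PySem.Set.nodup_ofList cv.2).filter _

lemma coverB_length (cc : List (String × List Int)) (pts : List Int) :
    (coverB cc pts).length = cc.length := by simp [coverB]

lemma coverB_getD (cc : List (String × List Int)) (pts : List Int) (i : Nat)
    (hi : i < cc.length) :
    (coverB cc pts).getD i []
      = (PySem.List.dedup (cc.getD i ("", [])).2).filter
          (fun p => PySem.Set.contains (PySem.Set.ofList pts) p) := by
  exact getD_map_lt cc _ i hi [] ("", [])

lemma coverB_contains (cc : List (String × List Int)) (pts : List Int) (i : Nat)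
    (hi : i < cc.length) (p : Int) (hp : p ∈ pts) :
    ((coverB cc pts).getD i []).contains p = (cc.getD i ("", [])).2.contains p := by
  rw [coverB_getD cc pts i hi]
  have hded : PySem.List.dedup (cc.getD i ("", [])).2
      = PySem.Set.ofList (cc.getD i ("", [])).2 := rfl
  simp only [List.contains_eq_mem, List.mem_filter, hded, PySem.Set.mem_ofList,
    setContains_ofList]
  simp [hp]

lemma update_rel (cc : List (String × List Int)) (pts : List Int) (hpts : pts.Nodup) :
    ∀ (s : List Int), (∀ p ∈ s, p ∈ pts) →
    ∀ (count : List Int) (covered : PySem.Set Int) (remaining : Int) (u : List Int),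
    INV cc pts u count covered remaining →
    INV cc pts (u.filter (fun x => !(s.contains x)))
      (s.foldl (stepU (bWhere (coverB cc pts))) (covered, remaining, count)).2.2
      (s.foldl (stepU (bWhere (coverB cc pts))) (covered, remaining, count)).1
      (s.foldl (stepU (bWhere (coverB cc pts))) (covered, remaining, count)).2.1 := by
  intro s
  induction s with
  | nil =>
    intro _ count covered remaining u hinv
    simpa [List.contains_eq_mem] using hinv
  | cons p t ih =>
    intro hs count covered remaining u hinv
    obtain ⟨hu, hrem, hcl, hcount⟩ := hinv
    have hup : p ∈ pts := hs p List.mem_cons_self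
    have hund : u.Nodup := hu ▸ hpts.filter _
    simp only [List.foldl_cons]
    by_cases hc : PySem.Set.contains covered p
    · have hcm : p ∈ covered := by
        simpa [PySem.Set.contains, List.contains_eq_mem] using hc
      have hpu : p ∉ u := by rw [hu]; simp [List.mem_filter, hcm]
      have hstep : stepU (bWhere (coverB cc pts)) (covered, remaining, count) p
          = (covered, remaining, count) := by simp [stepU, hcm]
      rw [hstep]
      have hfe : u.filter (fun x => !((p :: t).contains x))
          = u.filter (fun x => !(t.contains x)) := by
        apply List.filter_congr; intro x hx
        have hxp : ¬ (x == p) = true := by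
          simp only [beq_iff_eq]; rintro rfl; exact hpu hx
        simp [List.contains_eq_mem, List.mem_cons] at hxp ⊢
        tauto
      rw [hfe]
      exact ih (fun q hq => hs q (List.mem_cons_of_mem _ hq)) count covered remaining u
        ⟨hu, hrem, hcl, hcount⟩
    · have hcm : p ∉ covered := by
        simpa [PySem.Set.contains, List.contains_eq_mem] using hc
      have hpu : p ∈ u := by rw [hu]; simp [List.mem_filter, hcm, hup]
      have hstep : stepU (bWhere (coverB cc pts)) (covered, remaining, count) p
          = (PySem.Set.add covered p, remaining - 1,
             ((bWhere (coverB cc pts)).getD p []).foldl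
               (fun c j => c.set j (c.getD j 0 - 1)) count) := by
        simp [stepU, hcm]
      rw [hstep]
      have hcadd : PySem.Set.add covered p = covered ++ [p] := by
        simp [PySem.Set.add, hcm]
      have hwnd := coverB_nodup cc pts hpts
      have hjs_nodup := bWhere_nodup _ hwnd p
      have hjs_lt : ∀ j ∈ (bWhere (coverB cc pts)).getD p [], j < count.length := by
        intro j hj
        have h := ((bWhere_mem _ hwnd p j).mp hj).1
        rw [hcl]; rw [coverB_length] at h; exact h
      have hu'' : u.filter (fun x => !(x == p))
          = pts.filter (fun q => !(PySem.Set.contains (PySem.Set.add covered p) q)) := by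
        rw [hcadd, hu, List.filter_filter]
        apply List.filter_congr
        intro x _
        simp only [PySem.Set.contains, List.contains_eq_mem, List.mem_append,
          List.mem_singleton]
        cases hx1 : decide (x ∈ covered) <;> cases hx2 : decide (x = p) <;>
          simp_all
      have hrem' : remaining - 1 = ((u.filter (fun x => !(x == p))).length : Int) := by
        rw [length_filter_ne u p hund hpu, hrem]
      have hcl' : (((bWhere (coverB cc pts)).getD p []).foldl
          (fun c j => c.set j (c.getD j 0 - 1)) count).length = cc.length := by
        rw [dec_fold_length, hcl]
      have hcount' : ∀ i, i < cc.length →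
          (((bWhere (coverB cc pts)).getD p []).foldl
            (fun c j => c.set j (c.getD j 0 - 1)) count).getD i 0
          = gainP cc (u.filter (fun x => !(x == p))) i := by
        intro i hi
        rw [dec_fold_getD _ count hjs_nodup hjs_lt i,
          gainP_filter_ne cc u p hund hpu i, hcount i hi]
        congr 1
        have hmemiff : i ∈ (bWhere (coverB cc pts)).getD p []
            ↔ (cc.getD i ("", [])).2.contains p = true := by
          rw [bWhere_mem _ hwnd p i, coverB_length]
          constructor
          · rintro ⟨_, h2⟩; rwa [coverB_contains cc pts i hi p hup] at h2
          · intro h; exact ⟨hi, by rwa [coverB_contains cc pts i hi p hup]⟩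
        by_cases hmem : i ∈ (bWhere (coverB cc pts)).getD p []
        · rw [if_pos hmem, if_pos (hmemiff.mp hmem)]
        · rw [if_neg hmem, if_neg (fun h => hmem (hmemiff.mpr h))]
      have hrec := ih (fun q hq => hs q (List.mem_cons_of_mem _ hq)) _ _ _ _
        ⟨hu'', hrem', hcl', hcount'⟩
      have hfinal : (u.filter (fun x => !(x == p))).filter (fun x => !(t.contains x))
          = u.filter (fun x => !((p :: t).contains x)) := by
        rw [List.filter_filter]
        apply List.filter_congr
        intro x _
        cases hxp : (x == p) <;> cases hxt : t.contains x <;>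
          simp [List.contains_eq_mem, List.mem_cons, *] <;> simp_all [List.contains_eq_mem]
      rw [← hfinal]
      exact hrec

-- ---- the two loops run in lockstep ----

lemma loop_rel (i0 : List Int) (cc : List (String × List Int))
    (hD : ¬ D_optimize_cameras i0 cc) :
    ∀ (fuel : Nat) (u count : List Int) (covered : PySem.Set Int) (remaining : Int)
      (sel : List String),
    INV cc (PySem.Set.ofList i0) u count covered remaining →
    aLoop cc fuel u sel
      = bLoop (cc.map (·.1)) (coverB cc (PySem.Set.ofList i0))
          (bWhere (coverB cc (PySem.Set.ofList i0)))
          cc.length fuel count covered remaining sel := by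
  intro fuel
  induction fuel with
  | zero => intro u count covered remaining sel _; rfl
  | succ f ih =>
    intro u count covered remaining sel hinv
    obtain ⟨hu, hrem, hcl, hcount⟩ := hinv
    have hpts : (PySem.Set.ofList i0).Nodup := PySem.Set.nodup_ofList i0
    have hund : u.Nodup := hu ▸ hpts.filter _
    by_cases hue : u = []
    · have hr0 : remaining = 0 := by rw [hrem, hue]; rfl
      simp [aLoop, bLoop, hue, hr0]
    · have hne : u.isEmpty = false := by simp [hue]
      have hr0 : (remaining == 0) = false := by
        rw [hrem]
        simp [List.length_eq_zero_iff, hue]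
      rw [aLoop, bLoop, hne, hr0]
      simp only [Bool.false_eq_true, if_false]
      rcases scan_rel u cc count hcount with ⟨ha, hb⟩ | ⟨j, hj, ha, hb, hpos⟩
      · rw [ha, hb]
        norm_num
      · rw [ha, hb]
        have hjnneg : ¬ ((j : Int) < 0) := Int.not_ofNat_neg j
        simp only [hjnneg, if_false, Int.toNat_natCast]
        -- the chosen camera cannot be named "" outside D_
        have hbne : (cc.getD j ("", [])).1 ≠ "" := by
          intro h0
          have hmemcv : cc.getD j ("", []) ∈ cc := getD_mem cc j hj _
          have hpos' : 0 < (u.filter (fun x => (cc.getD j ("", [])).2.contains x)).length := by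
            have := hcount j hj
            rw [gainP] at this
            omega
          obtain ⟨x, hxu⟩ := List.exists_mem_of_length_pos hpos'
          have hxmem := List.mem_filter.mp hxu
          refine hD ⟨cc.getD j ("", []), hmemcv, h0, x, ?_, ?_⟩
          · simpa [List.contains_eq_mem] using hxmem.2
          · have : x ∈ PySem.Set.ofList i0 := by
              have := hu ▸ hxmem.1
              exact (List.mem_filter.mp this).1
            exact (PySem.Set.mem_ofList _ _).mp this
        rw [if_neg hbne]
        have hname : (cc.map (·.1)).getD j "" = (cc.getD j ("", [])).1 :=
          getD_map_lt cc _ j hj "" ("", [])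
        have hs_sub : ∀ p ∈ (coverB cc (PySem.Set.ofList i0)).getD j [],
            p ∈ PySem.Set.ofList i0 := by
          intro p hp
          rw [coverB_getD cc _ j hj] at hp
          have h2 := (List.mem_filter.mp hp).2
          simpa [setContains_ofList, List.contains_eq_mem] using h2
        have hupd := update_rel cc (PySem.Set.ofList i0) hpts
          ((coverB cc (PySem.Set.ofList i0)).getD j []) hs_sub
          count covered remaining u ⟨hu, hrem, hcl, hcount⟩
        have hufe : u.filter
              (fun x => !((u.filter (fun y => (cc.getD j ("", [])).2.contains y)).contains x))
            = u.filter
              (fun x => !(((coverB cc (PySem.Set.ofList i0)).getD j []).contains x)) := by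
          apply List.filter_congr
          intro x hx
          have hxpts : x ∈ PySem.Set.ofList i0 := by
            have := hu ▸ hx
            exact (List.mem_filter.mp this).1
          have h1 : (u.filter (fun y => (cc.getD j ("", [])).2.contains y)).contains x
              = (cc.getD j ("", [])).2.contains x := by
            simp [List.contains_eq_mem, List.mem_filter, hx]
          rw [h1, coverB_contains cc _ j hj x hxpts]
        rw [hname, hufe]
        exact ih _ _ _ _ _ hupd

-- ===== VERDICT (by name: the statement is the Claim_ definition above) =====
theorem optimize_cameras_spec : Claim_unchanged_optimize_cameras := by
  intro i cc _hdom
  unfold Spec_optimize_cameras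
  intro hD
  simp only [optimize_cameras, optimize_cameras_alt]
  have hdl : PySem.List.dedup i = PySem.Set.ofList i := rfl
  rw [hdl]
  have hcount0 : ∀ j, j < cc.length →
      ((coverB cc (PySem.Set.ofList i)).map (fun s => ((s.length : Int)))).getD j 0
        = gainP cc (PySem.Set.ofList i) j := by
    intro j hjlt
    have hjc : j < (coverB cc (PySem.Set.ofList i)).length := by
      rw [coverB_length]; exact hjlt
    rw [getD_map_lt _ _ j hjc 0 [], coverB_getD cc _ j hjlt]
    unfold gainP
    have hded : PySem.List.dedup (cc.getD j ("", [])).2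
        = PySem.Set.ofList (cc.getD j ("", [])).2 := rfl
    rw [hded]
    have h1 : ((PySem.Set.ofList (cc.getD j ("", [])).2).filter
        (fun p => PySem.Set.contains (PySem.Set.ofList (PySem.Set.ofList i)) p)).Nodup :=
      (PySem.Set.nodup_ofList _).filter _
    have h2 : ((PySem.Set.ofList i).filter
        (fun x => (cc.getD j ("", [])).2.contains x)).Nodup :=
      (PySem.Set.nodup_ofList i).filter _
    have hperm := (List.perm_ext_iff_of_nodup h1 h2).mpr (by
      intro a
      simp only [List.mem_filter, setContains_ofList, List.contains_eq_mem,
        PySem.Set.mem_ofList, decide_eq_true_eq]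
      tauto)
    rw [hperm.length_eq]
  have hu0 : PySem.Set.ofList i
      = (PySem.Set.ofList i).filter (fun p => !(PySem.Set.contains PySem.Set.empty p)) := by
    simp [PySem.Set.empty, PySem.Set.contains]
  have h := loop_rel i cc hD ((PySem.Set.ofList i).length + 1)
    (PySem.Set.ofList i)
    ((coverB cc (PySem.Set.ofList i)).map (fun s => ((s.length : Int))))
    PySem.Set.empty (((PySem.Set.ofList i).length : Int)) []
    ⟨hu0, rfl, by simp [coverB], hcount0⟩
  simpa [coverB, List.length_map] using h

theorem optimize_cameras_changed : Claim_changed_optimize_cameras := by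
  unfold Claim_changed_optimize_cameras; decide
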